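-- pv_equiv track=rewrite | github.com/jam1k/wolt_internship | j-wolt/delivery_price_calculator.py | delivery_based_on_items
-- ===== SOURCE A (Python) =====
-- def delivery_based_on_items(number_of_items: int):
--     # If the number of items is five or more, an additional 50 cent surcharge is added for each item above five.
--     # An extra "bulk" fee applies for more than 12 items of 1,20€
--     i = 0
--     item_fee = 0
--     while i <= number_of_items:
--         if i < 5:
--             item_fee = 0
--         else:
--             item_fee += 50
--         i += 1
--     if number_of_items >= 13:
--         item_fee += 120
--
--     return item_fee
-- ===== SOURCE B (Python) =====
-- def delivery_based_on_items(number_of_items: int):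
--     item_fee = 50 * max(0, number_of_items - 4)
--     if number_of_items >= 13:
--         item_fee += 120
--     return item_fee
-- ===== Notes on version B (the rewrite author's own statement) =====
-- stated objective: faster
-- what changed: Replaced the per-item counting loop by a closed-form computation of the item surcharge, keeping the bulk-fee branch.
import Mathlib
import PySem

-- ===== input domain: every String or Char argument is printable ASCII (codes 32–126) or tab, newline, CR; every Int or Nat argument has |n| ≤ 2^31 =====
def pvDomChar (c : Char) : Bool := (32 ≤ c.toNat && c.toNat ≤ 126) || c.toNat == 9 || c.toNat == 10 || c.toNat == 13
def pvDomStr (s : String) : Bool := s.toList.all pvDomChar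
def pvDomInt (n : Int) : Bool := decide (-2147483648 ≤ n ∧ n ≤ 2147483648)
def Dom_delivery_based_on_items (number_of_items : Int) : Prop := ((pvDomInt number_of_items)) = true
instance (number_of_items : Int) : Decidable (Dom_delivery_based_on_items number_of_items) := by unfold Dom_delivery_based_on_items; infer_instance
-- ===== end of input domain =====

-- B replaces A's O(n) counting loop by the closed form 50*max(0,n-4) (+120 bulk fee for n>=13); asymptotically faster.


-- ===== PORT A =====
-- the while loop: state (i, item_fee); runs while i <= number_of_items
def deliveryLoopA (n i fee : Int) : Int :=
  if i ≤ n then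
    deliveryLoopA n (i + 1) (if i < 5 then 0 else fee + 50)
  else fee
termination_by (n + 1 - i).toNat
decreasing_by omega

def delivery_based_on_items (number_of_items : Int) : Int :=
  let item_fee := deliveryLoopA number_of_items 0 0
  if number_of_items ≥ 13 then item_fee + 120 else item_fee

-- ===== PORT B =====
def delivery_based_on_items_alt (number_of_items : Int) : Int :=
  let item_fee := 50 * max 0 (number_of_items - 4)
  if number_of_items ≥ 13 then item_fee + 120 else item_fee

-- ===== PRECONDITION & SPEC =====
def Spec_delivery_based_on_items (number_of_items : Int) (out : Int) : Prop := out = delivery_based_on_items_alt number_of_items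
instance (number_of_items : Int) (out : Int) : Decidable (Spec_delivery_based_on_items number_of_items out) := by unfold Spec_delivery_based_on_items; infer_instance

-- ===== CLAIM (what is proved, stated in full; the proofs are below) =====
def Claim_equal_delivery_based_on_items : Prop := ∀ (number_of_items : Int), Dom_delivery_based_on_items number_of_items → Spec_delivery_based_on_items number_of_items (delivery_based_on_items number_of_items)

-- ===== LEMMAS AND PROOFS =====

-- once i ≥ 5 the loop adds 50 per remaining iteration
theorem deliveryLoopA_high (n : Int) : ∀ (i fee : Int), 5 ≤ i →
    deliveryLoopA n i fee = fee + 50 * max 0 (n - i + 1) := by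
  intro i fee h5
  induction hk : (n + 1 - i).toNat using Nat.strong_induction_on generalizing i fee with
  | _ k ih =>
    rw [deliveryLoopA]
    split
    · rename_i hle
      rw [ih ((n + 1 - (i + 1)).toNat) (by omega) (i + 1) _ (by omega) rfl]
      split
      · omega
      · omega
    · rename_i hgt
      omega

-- the reset phase i = 0..4 leaves fee = 0
theorem deliveryLoopA_zero (n : Int) : deliveryLoopA n 0 0 = 50 * max 0 (n - 4) := by
  rw [deliveryLoopA]; split
  · rw [deliveryLoopA]; split
    · rw [deliveryLoopA]; split
      · rw [deliveryLoopA]; split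
        · rw [deliveryLoopA]; split
          · norm_num
            rw [deliveryLoopA_high n 5 0 (by omega)]
            omega
          · omega
        · omega
      · omega
    · omega
  · omega

-- ===== VERDICT (by name: the statement is the Claim_ definition above) =====
theorem delivery_based_on_items_spec : Claim_equal_delivery_based_on_items := by
  intro n _
  unfold Spec_delivery_based_on_items delivery_based_on_items delivery_based_on_items_alt
  simp only [deliveryLoopA_zero]
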